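-- pv_equiv track=rewrite | github.com/brandeis-llc/clams-acoustic-classification-segmentation | writer.py | index_frames
-- ===== SOURCE A (Python) =====
-- def index_frames(predictions):
--     speech = False
--     segments = {}
--     cur_speech_segment_started = 0
--     for f_num, frame in enumerate(predictions):
--         if speech and frame == 1:
--             segments[cur_speech_segment_started] = f_num - 1
--             speech = False
--         elif not speech and frame == 0:
--             cur_speech_segment_started = f_num
--             speech = True
--     if speech:
--         segments[cur_speech_segment_started] = len(predictions) - 1
--     return segments, len(predictions)
-- ===== SOURCE B (Python) =====
-- def index_frames(predictions):
--     n = len(predictions)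
--     segments = {}
--     rest = predictions
--     base = 0
--     while rest:
--         try:
--             o = rest.index(1)
--         except ValueError:
--             o = len(rest)
--         gap = rest[:o]
--         if 0 in gap:
--             segments[base + gap.index(0)] = base + o - 1
--         base += o + 1
--         rest = rest[o + 1:]
--     return segments, n
-- ===== Notes on version B (the rewrite author's own statement) =====
-- stated objective: alternative
-- what changed: Replaces A's online boolean flag-toggling state machine over enumerated frames with a delimiter-splitting decomposition: B repeatedly finds the next 1 with list.index, takes the gap before it as a slice, and records a segment from the gap's first 0 to just before the delimiter.
import Mathlib
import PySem

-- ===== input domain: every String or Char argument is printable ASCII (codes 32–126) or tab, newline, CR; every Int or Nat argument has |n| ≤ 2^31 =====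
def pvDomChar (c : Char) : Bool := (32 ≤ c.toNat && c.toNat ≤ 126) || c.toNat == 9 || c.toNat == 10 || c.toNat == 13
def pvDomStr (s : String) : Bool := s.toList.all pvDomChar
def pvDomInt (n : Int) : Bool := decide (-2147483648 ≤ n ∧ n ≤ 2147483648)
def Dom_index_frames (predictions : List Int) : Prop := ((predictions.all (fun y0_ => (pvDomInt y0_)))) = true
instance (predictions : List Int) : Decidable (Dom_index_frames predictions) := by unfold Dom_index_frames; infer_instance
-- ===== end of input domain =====

-- B rewrites A's online flag-toggling loop as repeated splitting on the delimiter 1 (objective: alternative decomposition, same cost).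

-- ===== PORT A =====
-- one loop step of A: state = (speech, segments, cur_speech_segment_started)
def aStep (s : Bool × PySem.Dict Int Int × Int) (p : Int × Int) : Bool × PySem.Dict Int Int × Int :=
  match s with
  | (speech, segments, cur) =>
    if speech && (p.2 == 1) then (false, segments.insert cur (p.1 - 1), cur)
    else if !speech && (p.2 == 0) then (true, segments, p.1)
    else (speech, segments, cur)

def index_frames (predictions : List Int) : (List (Int × Int)) × Int :=
  let st := (PySem.List.enumerate predictions 0).foldl aStep (false, PySem.Dict.empty, 0)
  let segments := if st.1 then st.2.1.insert st.2.2 ((predictions.length : Int) - 1) else st.2.1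
  (segments.items, (predictions.length : Int))

-- ===== PORT B =====
-- the while-rest loop of Source B; o = rest.index(1) (or len(rest)), gap = rest[:o]
def bLoop : List Int → Int → PySem.Dict Int Int → PySem.Dict Int Int
  | [], _, segs => segs
  | x :: xs, base, segs =>
      let rest := x :: xs
      let o : Nat := (PySem.List.index? rest 1).getD rest.length
      let gap := PySem.List.slice rest none (some (o : Int))
      let segs' :=
        if gap.contains 0 then
          match PySem.List.index? gap 0 with
          | some z => segs.insert (base + (z : Int)) (base + (o : Int) - 1)
          | none => segs
        else segs
      bLoop (PySem.List.slice rest (some ((o : Int) + 1)) none) (base + (o : Int) + 1) segs'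
termination_by rest _ _ => rest.length
decreasing_by
  have : ((o : Int) + 1) = (((o + 1 : Nat) : Int)) := by push_cast; ring
  rw [this, PySem.List.slice_from_natCast]
  simp

def index_frames_alt (predictions : List Int) : (List (Int × Int)) × Int :=
  ((bLoop predictions 0 PySem.Dict.empty).items, (predictions.length : Int))

-- ===== PRECONDITION & SPEC =====
def Spec_index_frames (predictions : List Int) (out : (List (Int × Int)) × Int) : Prop := out = index_frames_alt predictions
instance (predictions : List Int) (out : (List (Int × Int)) × Int) : Decidable (Spec_index_frames predictions out) := by unfold Spec_index_frames; infer_instance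

-- ===== CLAIM (what is proved, stated in full; the proofs are below) =====
def Claim_equal_index_frames : Prop := ∀ (predictions : List Int), Dom_index_frames predictions → Spec_index_frames predictions (index_frames predictions)

-- ===== LEMMAS AND PROOFS =====

-- common reference recursion: k = current index, mode = none (idle) / some c (inside a segment started at c)
def go : Int → Option Int → List Int → PySem.Dict Int Int → PySem.Dict Int Int
  | _, none, [], segs => segs
  | k, some c, [], segs => segs.insert c (k - 1)
  | k, none, x :: xs, segs => if x = 0 then go (k+1) (some k) xs segs else go (k+1) none xs segs
  | k, some c, x :: xs, segs => if x = 1 then go (k+1) none xs (segs.insert c (k-1)) else go (k+1) (some c) xs segs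

-- A's fold (plus final flush) equals go
lemma foldA (xs : List Int) : ∀ (k : Int) (segs : PySem.Dict Int Int) (c : Int) (speech : Bool),
    (let st := (PySem.List.enumerate xs k).foldl aStep (speech, segs, c)
     if st.1 then st.2.1.insert st.2.2 (k + (xs.length : Int) - 1) else st.2.1)
    = go k (if speech then some c else none) xs segs := by
  induction xs with
  | nil =>
    intro k segs c speech
    cases speech <;> simp [PySem.List.enumerate, go]
  | cons x xs ih =>
    intro k segs c speech
    rw [PySem.List.enumerate_cons]
    simp only [List.foldl_cons, List.length_cons]
    push_cast
    rw [show k + ((xs.length : Int) + 1) - 1 = (k+1) + (xs.length : Int) - 1 by ring]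
    cases speech with
    | false =>
      by_cases hx : x = 0
      · subst hx
        simpa [aStep, go] using ih (k+1) segs k true
      · simpa [aStep, go, hx] using ih (k+1) segs c false
    | true =>
      by_cases hx : x = 1
      · subst hx
        simpa [aStep, go] using ih (k+1) (segs.insert c (k-1)) c false
      · simpa [aStep, go, hx] using ih (k+1) segs c true

-- active mode scans to the first 1
lemma go_some (xs : List Int) : ∀ (k c : Int) (segs : PySem.Dict Int Int),
    go k (some c) xs segs =
      match PySem.List.index? xs 1 with
      | some j => go (k + (j : Int) + 1) none (xs.drop (j+1)) (segs.insert c (k + (j : Int) - 1))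
      | none => segs.insert c (k + (xs.length : Int) - 1) := by
  induction xs with
  | nil =>
    intro k c segs
    simp [go, PySem.List.index?]
  | cons x xs ih =>
    intro k c segs
    by_cases hx : x = 1
    · subst hx
      rw [PySem.List.index?_cons_self]
      simp [go]
    · have h1 : PySem.List.index? (x :: xs) 1 = (PySem.List.index? xs 1).map (· + 1) :=
        PySem.List.index?_cons_of_ne _ hx
      simp only [go, if_neg hx, h1]
      rw [ih (k+1) c segs]
      cases hidx : PySem.List.index? xs 1 with
      | none =>
        simp only [Option.map_none]
        congr 1
        simp only [List.length_cons]
        push_cast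
        ring
      | some j =>
        simp only [Option.map_some]
        have e1 : k + 1 + (j : Int) + 1 = k + ((j + 1 : Nat) : Int) + 1 := by push_cast; ring
        have e2 : k + 1 + (j : Int) - 1 = k + ((j + 1 : Nat) : Int) - 1 := by push_cast; ring
        rw [e1, e2]
        rfl

-- the gap decomposition: o = index of the first 1 (or length), and what one gap contributes
def gapO (xs : List Int) : Nat := (PySem.List.index? xs 1).getD xs.length

def gapStep (xs : List Int) (k : Int) (segs : PySem.Dict Int Int) : PySem.Dict Int Int :=
  match PySem.List.index? (xs.take (gapO xs)) 0 with
  | some z => segs.insert (k + (z : Int)) (k + (gapO xs : Int) - 1)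
  | none => segs

lemma gapO_cons_of_ne (x : Int) (xs : List Int) (hx1 : x ≠ 1) : gapO (x :: xs) = gapO xs + 1 := by
  unfold gapO
  rw [PySem.List.index?_cons_of_ne _ hx1]
  cases PySem.List.index? xs 1 <;> simp

-- idle-mode go consumes one whole gap at a time
lemma go_gap (xs : List Int) : ∀ (k : Int) (segs : PySem.Dict Int Int),
    go k none xs segs
      = go (k + (gapO xs : Int) + 1) none (xs.drop (gapO xs + 1)) (gapStep xs k segs) := by
  induction xs with
  | nil =>
    intro k segs
    simp [go, gapO, gapStep, PySem.List.index?]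
  | cons x xs ih =>
    intro k segs
    by_cases hx1 : x = 1
    · subst hx1
      have ho : gapO ((1:Int) :: xs) = 0 := by
        unfold gapO
        rw [PySem.List.index?_cons_self]
        rfl
      have hg : gapStep ((1:Int) :: xs) k segs = segs := by
        simp [gapStep, ho, PySem.List.index?]
      rw [ho, hg]
      simp [go]
    · have h1 : PySem.List.index? (x :: xs) 1 = (PySem.List.index? xs 1).map (· + 1) :=
        PySem.List.index?_cons_of_ne _ hx1
      have ho := gapO_cons_of_ne x xs hx1
      by_cases hx0 : x = 0
      · subst hx0
        have hlhs : go k none ((0:Int) :: xs) segs = go (k+1) (some k) xs segs := by simp [go]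
        rw [hlhs, go_some]
        have htake : ((0:Int) :: xs).take (gapO ((0:Int) :: xs)) = (0:Int) :: xs.take (gapO xs) := by
          rw [ho, List.take_succ_cons]
        have hg : gapStep ((0:Int) :: xs) k segs
            = segs.insert k (k + (gapO xs : Int)) := by
          unfold gapStep
          rw [htake, PySem.List.index?_cons_self, ho]
          push_cast
          ring_nf
        cases hidx : PySem.List.index? xs 1 with
        | some j =>
          have hoj : gapO xs = j := by unfold gapO; rw [hidx]; rfl
          simp only [hg, ho, hoj, List.drop_succ_cons]
          congr 2 <;> push_cast <;> ring
        | none =>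
          have hoj : gapO xs = xs.length := by unfold gapO; rw [hidx]; rfl
          simp only [hg, ho, hoj]
          have hdrop : List.drop (xs.length + 1 + 1) ((0:Int) :: xs) = [] :=
            List.drop_eq_nil_of_le (by simp)
          rw [hdrop]
          simp only [go]
          congr 1
          ring
      · -- x is neither 0 nor 1: the whole gap shifts by one
        have hlhs : go k none (x :: xs) segs = go (k+1) none xs segs := by simp [go, hx0]
        have htake : (x :: xs).take (gapO (x :: xs)) = x :: xs.take (gapO xs) := by
          rw [ho, List.take_succ_cons]
        have hg : gapStep (x :: xs) k segs = gapStep xs (k+1) segs := by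
          unfold gapStep
          rw [htake, PySem.List.index?_cons_of_ne _ hx0, ho]
          cases hz : PySem.List.index? (xs.take (gapO xs)) 0 with
          | none => rfl
          | some z =>
            simp only [Option.map_some]
            congr 1 <;> push_cast <;> ring
        rw [hlhs, ih (k+1) segs, hg, ho, List.drop_succ_cons]
        congr 2
        push_cast
        ring

-- B's loop equals go in idle mode
lemma bLoop_eq_go_aux (n : Nat) : ∀ (rest : List Int), rest.length ≤ n →
    ∀ (base : Int) (segs : PySem.Dict Int Int),
    bLoop rest base segs = go base none rest segs := by
  induction n with
  | zero =>
    intro rest h base segs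
    have : rest = [] := by
      cases rest with
      | nil => rfl
      | cons a l => simp at h
    subst this
    simp [bLoop, go]
  | succ n ih =>
    intro rest h base segs
    cases rest with
    | nil => simp [bLoop, go]
    | cons x xs =>
      rw [bLoop, go_gap]
      have hslice_to : PySem.List.slice (x :: xs) none (some ((gapO (x :: xs) : Nat) : Int))
          = (x :: xs).take (gapO (x :: xs)) := PySem.List.slice_to_natCast _ _
      have hslice_from : PySem.List.slice (x :: xs) (some (((gapO (x :: xs) : Nat) : Int) + 1)) none
          = (x :: xs).drop (gapO (x :: xs) + 1) := by
        rw [show (((gapO (x :: xs) : Nat) : Int) + 1) = (((gapO (x :: xs) + 1 : Nat)) : Int) by push_cast; ring]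
        exact PySem.List.slice_from_natCast _ _
      show bLoop (PySem.List.slice (x :: xs) (some (((gapO (x :: xs) : Nat) : Int) + 1)) none)
            (base + ((gapO (x :: xs) : Nat) : Int) + 1) _ = _
      rw [hslice_from]
      have hlen : ((x :: xs).drop (gapO (x :: xs) + 1)).length ≤ n := by
        simp only [List.length_drop, List.length_cons] at *
        omega
      rw [ih _ hlen]
      congr 1
      -- the if/contains wrapper equals gapStep
      have hdef : (PySem.List.index? (x :: xs) 1).getD (x :: xs).length = gapO (x :: xs) := rfl
      rw [hdef, hslice_to]
      unfold gapStep
      cases hz : PySem.List.index? ((x :: xs).take (gapO (x :: xs))) 0 with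
      | none =>
        have hmem : (0:Int) ∉ (x :: xs).take (gapO (x :: xs)) := by
          rw [← PySem.List.index?_eq_none_iff, hz]
        simp [hmem]
      | some z =>
        have hmem : (0:Int) ∈ (x :: xs).take (gapO (x :: xs)) := by
          rw [← PySem.List.index?_isSome_iff, hz]; rfl
        simp [hmem]

lemma bLoop_eq_go (rest : List Int) : ∀ (base : Int) (segs : PySem.Dict Int Int),
    bLoop rest base segs = go base none rest segs :=
  fun base segs => bLoop_eq_go_aux rest.length rest le_rfl base segs

-- ===== VERDICT (by name: the statement is the Claim_ definition above) =====
theorem index_frames_spec : Claim_equal_index_frames := by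
  intro predictions _
  unfold Spec_index_frames index_frames index_frames_alt
  simp only [bLoop_eq_go]
  have h := foldA predictions 0 PySem.Dict.empty 0 false
  simp only [zero_add] at h
  simp only [h]
  simp
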